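-- pv_equiv track=rewrite | github.com/aw449/Triple-Agonist-Peptide-Therapeutics-for-Metabolic-Disease | peptide_sequence_handler.py | _is_conservative_substitution
-- ===== SOURCE A (Python) =====
-- def _is_conservative_substitution(aa1: str, aa2: str) -> bool:
--     """Check if amino acid substitution is conservative."""
--     # Define conservative substitution groups
--     conservative_groups = [
--         set(['I', 'L', 'V']),        # Aliphatic
--         set(['F', 'W', 'Y']),        # Aromatic
--         set(['S', 'T']),             # Small polar
--         set(['D', 'E']),             # Acidic
--         set(['K', 'R']),             # Basic
--         set(['N', 'Q']),             # Amide
--     ]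
--
--     for group in conservative_groups:
--         if aa1 in group and aa2 in group:
--             return True
--
--     return False
-- ===== SOURCE B (Python) =====
-- _GROUP_OF = {
--     aa: gid
--     for gid, grp in enumerate(
--         (('I', 'L', 'V'),   # Aliphatic
--          ('F', 'W', 'Y'),   # Aromatic
--          ('S', 'T'),        # Small polar
--          ('D', 'E'),        # Acidic
--          ('K', 'R'),        # Basic
--          ('N', 'Q')))       # Amide
--     for aa in grp
-- }
--
--
-- def _is_conservative_substitution(aa1: str, aa2: str) -> bool:
--     """Check if amino acid substitution is conservative."""
--     gid = _GROUP_OF.get(aa1)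
--     return gid is not None and gid == _GROUP_OF.get(aa2)
-- ===== Notes on version B (the rewrite author's own statement) =====
-- stated objective: idiomatic
-- what changed: B replaces the loop over six sets by a single letter-to-group-id dict built once at module level and compares the two looked-up ids (unknown letters map to None and never match).
import Mathlib
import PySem

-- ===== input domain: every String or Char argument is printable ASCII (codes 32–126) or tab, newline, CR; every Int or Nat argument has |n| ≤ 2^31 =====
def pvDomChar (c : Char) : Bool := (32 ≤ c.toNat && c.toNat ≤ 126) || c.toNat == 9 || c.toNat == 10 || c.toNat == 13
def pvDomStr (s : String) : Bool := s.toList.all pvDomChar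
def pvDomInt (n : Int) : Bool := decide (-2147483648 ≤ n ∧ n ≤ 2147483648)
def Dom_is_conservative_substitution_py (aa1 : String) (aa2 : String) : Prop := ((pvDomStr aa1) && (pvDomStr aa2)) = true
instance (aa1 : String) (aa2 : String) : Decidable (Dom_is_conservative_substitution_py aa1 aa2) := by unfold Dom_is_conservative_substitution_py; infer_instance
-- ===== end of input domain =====

-- B replaces A's per-call scan over six literal sets by one letter→group-id dict built once and two lookups (idiomatic; same observable results).

-- ===== PORT A =====
-- the literal list of the six conservative groups, as in A
def pvConservativeGroups : List (PySem.Set String) :=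
  [ PySem.Set.ofList ["I", "L", "V"]
  , PySem.Set.ofList ["F", "W", "Y"]
  , PySem.Set.ofList ["S", "T"]
  , PySem.Set.ofList ["D", "E"]
  , PySem.Set.ofList ["K", "R"]
  , PySem.Set.ofList ["N", "Q"] ]

-- the 'for group in conservative_groups' loop with its early 'return True'
def pvGroupLoop (aa1 aa2 : String) : List (PySem.Set String) → Bool
  | [] => false
  | g :: rest =>
      if PySem.Set.contains g aa1 && PySem.Set.contains g aa2 then true
      else pvGroupLoop aa1 aa2 rest

def is_conservative_substitution_py (aa1 : String) (aa2 : String) : Bool :=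
  pvGroupLoop aa1 aa2 pvConservativeGroups

-- ===== PORT B =====
-- B's module-level dict comprehension: {aa: gid for gid, grp in enumerate(...) for aa in grp}
def pvGroupOf : PySem.Dict String Int :=
  ((PySem.List.enumerate [["I", "L", "V"], ["F", "W", "Y"], ["S", "T"], ["D", "E"], ["K", "R"], ["N", "Q"]]).flatMap
      (fun p => p.2.map (fun aa => (aa, (p.1 : Int))))).foldl
    (fun d p => d.insert p.1 p.2) PySem.Dict.empty

-- gid = _GROUP_OF.get(aa1); return gid is not None and gid == _GROUP_OF.get(aa2)
def is_conservative_substitution_py_alt (aa1 : String) (aa2 : String) : Bool :=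
  match PySem.Dict.get? pvGroupOf aa1 with
  | none => false
  | some gid => PySem.Dict.get? pvGroupOf aa2 == some gid

-- ===== PRECONDITION & SPEC =====
def Spec_is_conservative_substitution_py (aa1 : String) (aa2 : String) (out : Bool) : Prop := out = is_conservative_substitution_py_alt aa1 aa2
instance (aa1 : String) (aa2 : String) (out : Bool) : Decidable (Spec_is_conservative_substitution_py aa1 aa2 out) := by unfold Spec_is_conservative_substitution_py; infer_instance

-- ===== CLAIM (what is proved, stated in full; the proofs are below) =====
def Claim_equal_is_conservative_substitution_py : Prop := ∀ (aa1 : String) (aa2 : String), Dom_is_conservative_substitution_py aa1 aa2 → Spec_is_conservative_substitution_py aa1 aa2 (is_conservative_substitution_py aa1 aa2)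

-- ===== LEMMAS AND PROOFS =====

-- the common abstraction both ports compute through: the group id of a residue
def pvGid (x : String) : Option Int :=
  if x = "I" ∨ x = "L" ∨ x = "V" then some 0
  else if x = "F" ∨ x = "W" ∨ x = "Y" then some 1
  else if x = "S" ∨ x = "T" then some 2
  else if x = "D" ∨ x = "E" then some 3
  else if x = "K" ∨ x = "R" then some 4
  else if x = "N" ∨ x = "Q" then some 5
  else none

theorem m0 (x : String) :
    PySem.Set.contains (PySem.Set.ofList ["I","L","V"]) x = (pvGid x == some 0) := by
  simp only [pvGid]
  split_ifs with g1 g2 g3 g4 g5 g6 <;>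
    first
      | (simp_all [PySem.Set.contains_eq_listContains, PySem.Set.ofList]; done)
      | (rcases g1 with rfl | rfl | rfl <;> decide)
      | (rcases g2 with rfl | rfl | rfl <;> decide)
      | (rcases g3 with rfl | rfl <;> decide)
      | (rcases g4 with rfl | rfl <;> decide)
      | (rcases g5 with rfl | rfl <;> decide)
      | (rcases g6 with rfl | rfl <;> decide)

theorem m1 (x : String) :
    PySem.Set.contains (PySem.Set.ofList ["F","W","Y"]) x = (pvGid x == some 1) := by
  simp only [pvGid]
  split_ifs with g1 g2 g3 g4 g5 g6 <;>
    first
      | (simp_all [PySem.Set.contains_eq_listContains, PySem.Set.ofList]; done)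
      | (rcases g1 with rfl | rfl | rfl <;> decide)
      | (rcases g2 with rfl | rfl | rfl <;> decide)
      | (rcases g3 with rfl | rfl <;> decide)
      | (rcases g4 with rfl | rfl <;> decide)
      | (rcases g5 with rfl | rfl <;> decide)
      | (rcases g6 with rfl | rfl <;> decide)

theorem m2 (x : String) :
    PySem.Set.contains (PySem.Set.ofList ["S","T"]) x = (pvGid x == some 2) := by
  simp only [pvGid]
  split_ifs with g1 g2 g3 g4 g5 g6 <;>
    first
      | (simp_all [PySem.Set.contains_eq_listContains, PySem.Set.ofList]; done)
      | (rcases g1 with rfl | rfl | rfl <;> decide)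
      | (rcases g2 with rfl | rfl | rfl <;> decide)
      | (rcases g3 with rfl | rfl <;> decide)
      | (rcases g4 with rfl | rfl <;> decide)
      | (rcases g5 with rfl | rfl <;> decide)
      | (rcases g6 with rfl | rfl <;> decide)

theorem m3 (x : String) :
    PySem.Set.contains (PySem.Set.ofList ["D","E"]) x = (pvGid x == some 3) := by
  simp only [pvGid]
  split_ifs with g1 g2 g3 g4 g5 g6 <;>
    first
      | (simp_all [PySem.Set.contains_eq_listContains, PySem.Set.ofList]; done)
      | (rcases g1 with rfl | rfl | rfl <;> decide)
      | (rcases g2 with rfl | rfl | rfl <;> decide)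
      | (rcases g3 with rfl | rfl <;> decide)
      | (rcases g4 with rfl | rfl <;> decide)
      | (rcases g5 with rfl | rfl <;> decide)
      | (rcases g6 with rfl | rfl <;> decide)

theorem m4 (x : String) :
    PySem.Set.contains (PySem.Set.ofList ["K","R"]) x = (pvGid x == some 4) := by
  simp only [pvGid]
  split_ifs with g1 g2 g3 g4 g5 g6 <;>
    first
      | (simp_all [PySem.Set.contains_eq_listContains, PySem.Set.ofList]; done)
      | (rcases g1 with rfl | rfl | rfl <;> decide)
      | (rcases g2 with rfl | rfl | rfl <;> decide)
      | (rcases g3 with rfl | rfl <;> decide)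
      | (rcases g4 with rfl | rfl <;> decide)
      | (rcases g5 with rfl | rfl <;> decide)
      | (rcases g6 with rfl | rfl <;> decide)

theorem m5 (x : String) :
    PySem.Set.contains (PySem.Set.ofList ["N","Q"]) x = (pvGid x == some 5) := by
  simp only [pvGid]
  split_ifs with g1 g2 g3 g4 g5 g6 <;>
    first
      | (simp_all [PySem.Set.contains_eq_listContains, PySem.Set.ofList]; done)
      | (rcases g1 with rfl | rfl | rfl <;> decide)
      | (rcases g2 with rfl | rfl | rfl <;> decide)
      | (rcases g3 with rfl | rfl <;> decide)
      | (rcases g4 with rfl | rfl <;> decide)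
      | (rcases g5 with rfl | rfl <;> decide)
      | (rcases g6 with rfl | rfl <;> decide)

theorem pvGid_cases (x : String) :
    pvGid x = none ∨ pvGid x = some 0 ∨ pvGid x = some 1 ∨ pvGid x = some 2 ∨
      pvGid x = some 3 ∨ pvGid x = some 4 ∨ pvGid x = some 5 := by
  simp only [pvGid]; split_ifs <;> simp

theorem loopL (a b : String) :
    pvGroupLoop a b pvConservativeGroups =
      (match pvGid a with | none => false | some g => pvGid b == some g) := by
  have ha := pvGid_cases a
  have hb := pvGid_cases b
  simp only [pvConservativeGroups, pvGroupLoop, m0, m1, m2, m3, m4, m5]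
  rcases ha with h | h | h | h | h | h | h <;> rcases hb with h' | h' | h' | h' | h' | h' | h' <;>
    rw [h, h'] <;> rfl

theorem dictL (x : String) : PySem.Dict.get? pvGroupOf x = pvGid x := by
  have h : pvGroupOf = PySem.Dict.mk [("I",0),("L",0),("V",0),("F",1),("W",1),("Y",1),("S",2),("T",2),("D",3),("E",3),("K",4),("R",4),("N",5),("Q",5)] := by rfl
  rw [h]
  by_cases h0 : x = "I"
  · subst h0; rfl
  by_cases h1 : x = "L"
  · subst h1; rfl
  by_cases h2 : x = "V"
  · subst h2; rfl
  by_cases h3 : x = "F"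
  · subst h3; rfl
  by_cases h4 : x = "W"
  · subst h4; rfl
  by_cases h5 : x = "Y"
  · subst h5; rfl
  by_cases h6 : x = "S"
  · subst h6; rfl
  by_cases h7 : x = "T"
  · subst h7; rfl
  by_cases h8 : x = "D"
  · subst h8; rfl
  by_cases h9 : x = "E"
  · subst h9; rfl
  by_cases h10 : x = "K"
  · subst h10; rfl
  by_cases h11 : x = "R"
  · subst h11; rfl
  by_cases h12 : x = "N"
  · subst h12; rfl
  by_cases h13 : x = "Q"
  · subst h13; rfl
  · simp [pvGid, h0, h1, h2, h3, h4, h5, h6, h7, h8, h9, h10, h11, h12, h13, Ne.symm, PySem.Dict.get?]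

theorem pv_key (aa1 aa2 : String) :
    is_conservative_substitution_py aa1 aa2 = is_conservative_substitution_py_alt aa1 aa2 := by
  simp only [is_conservative_substitution_py, is_conservative_substitution_py_alt, dictL, loopL]

-- ===== VERDICT (by name: the statement is the Claim_ definition above) =====
theorem is_conservative_substitution_py_spec : Claim_equal_is_conservative_substitution_py := by
  intro aa1 aa2 _
  exact pv_key aa1 aa2
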